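-- pv_equiv track=rewrite | github.com/Aquariuaa/OMLog | omlog-open-source/src/meta_utils.py | filter_normal_by_ND
-- ===== SOURCE A (Python) =====
-- def filter_normal_by_ND(input_dict, pred_key):
--     '''
--     for filter normal samples from batch
--     :param input_dict:
--     :param pred_key:
--     :return:
--     '''
--
--     preds = input_dict[pred_key]
--     filtered_dict = {}
--     for key, value in input_dict.items():
--         if key != pred_key and isinstance(value, list) and len(value) == len(preds):
--             filtered_value = [v for v, p in zip(value, preds) if p]
--             if filtered_value:
--                 filtered_dict[key] = filtered_value
--     filtered_dict[pred_key] = [p for p in preds if p]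
--     return filtered_dict
-- ===== SOURCE B (Python) =====
-- def filter_normal_by_ND(input_dict, pred_key):
--     preds = input_dict[pred_key]
--     # column-oriented: collect the candidate columns once, then ONE pass over
--     # prediction positions appends to every surviving column in parallel
--     # (a transposed traversal instead of per-key re-filtering).
--     cands, cols = [], []
--     for key, value in input_dict.items():
--         if key != pred_key and isinstance(value, list) and len(value) == len(preds):
--             cands.append(key)
--             cols.append(value)
--     acc = [[] for _ in cols]
--     kept = []
--     for i, p in enumerate(preds):
--         if p:
--             kept.append(p)
--             for j in range(len(cols)):
--                 acc[j].append(cols[j][i])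
--     out = {}
--     for key, a in zip(cands, acc):
--         if a:
--             out[key] = a
--     out[pred_key] = kept
--     return out
-- ===== Notes on version B (the rewrite author's own statement) =====
-- stated objective: alternative
-- what changed: B transposes the traversal: it collects the candidate columns once, then a single pass over the prediction positions appends the value at each kept position to every column in parallel (building all outputs column-by-position), instead of re-filtering each value against the whole mask per key.
-- outside the precondition, e.g. on filter_normal_by_ND({'a': [1, 2]}, 'pred'): A raises KeyError, B raises KeyError
import Mathlib
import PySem

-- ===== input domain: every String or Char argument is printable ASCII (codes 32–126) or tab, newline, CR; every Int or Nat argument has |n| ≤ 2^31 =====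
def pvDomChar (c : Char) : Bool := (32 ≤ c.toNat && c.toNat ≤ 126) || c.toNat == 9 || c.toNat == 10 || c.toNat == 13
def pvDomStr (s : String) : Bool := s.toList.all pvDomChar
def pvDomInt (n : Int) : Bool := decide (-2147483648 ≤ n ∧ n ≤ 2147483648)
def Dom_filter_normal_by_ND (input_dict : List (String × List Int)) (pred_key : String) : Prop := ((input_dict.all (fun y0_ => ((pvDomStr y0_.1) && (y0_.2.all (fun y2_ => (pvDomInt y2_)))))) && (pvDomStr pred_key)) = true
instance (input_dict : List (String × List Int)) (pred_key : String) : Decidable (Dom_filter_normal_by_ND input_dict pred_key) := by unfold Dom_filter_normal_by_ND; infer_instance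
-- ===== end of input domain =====

-- B transposes the traversal (column-oriented single pass over positions); objective: alternative decomposition.

-- ===== PORT A =====
-- [v for v, p in zip(value, preds) if p]
def pvZipFilter (value preds : List Int) : List Int :=
  (value.zip preds).filterMap (fun vp => if vp.2 ≠ 0 then some vp.1 else none)

def filter_normal_by_ND (input_dict : List (String × List Int)) (pred_key : String) : List (String × List Int) :=
  match (PySem.Dict.ofList input_dict).get? pred_key with
  | none => []  -- KeyError: excluded by Pre_
  | some preds =>
    (((PySem.Dict.ofList input_dict).items.foldl (fun fd kv =>
        if kv.1 ≠ pred_key ∧ kv.2.length = preds.length then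
          if pvZipFilter kv.2 preds ≠ [] then fd.insert kv.1 (pvZipFilter kv.2 preds) else fd
        else fd) (PySem.Dict.empty)).insert
      pred_key (preds.filter (fun p => p ≠ 0))).items

-- ===== PORT B =====
def filter_normal_by_ND_alt (input_dict : List (String × List Int)) (pred_key : String) : List (String × List Int) :=
  match (PySem.Dict.ofList input_dict).get? pred_key with
  | none => []  -- KeyError: excluded by Pre_
  | some preds =>
    -- first loop: cands, cols collected in parallel
    let cc := (PySem.Dict.ofList input_dict).items.foldl
        (fun (cc : List String × List (List Int)) kv =>
          if kv.1 ≠ pred_key ∧ kv.2.length = preds.length then (cc.1 ++ [kv.1], cc.2 ++ [kv.2]) else cc)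
        ([], [])
    -- second loop: one pass over enumerate(preds), appending to every column in parallel
    let st := (PySem.List.enumerate preds).foldl
        (fun (st : List (List Int) × List Int) ip =>
          if ip.2 ≠ 0 then
            (List.zipWith (fun a c => a ++ [PySem.List.pyGetD c ip.1 0]) st.1 cc.2, st.2 ++ [ip.2])
          else st)
        (cc.2.map (fun _ => ([] : List Int)), [])
    -- final loop: keep non-empty columns, then insert the filtered preds
    (((cc.1.zip st.1).foldl
        (fun out ka => if ka.2 ≠ [] then out.insert ka.1 ka.2 else out)
        (PySem.Dict.empty : PySem.Dict String (List Int))).insert pred_key st.2).items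

-- ===== PRECONDITION & SPEC =====
-- Pre_ excludes exactly the inputs whose dict has no entry for pred_key: there A raises KeyError.
def Pre_filter_normal_by_ND (input_dict : List (String × List Int)) (pred_key : String) : Prop :=
  input_dict.any (fun kv => kv.1 == pred_key) = true
instance (input_dict : List (String × List Int)) (pred_key : String) : Decidable (Pre_filter_normal_by_ND input_dict pred_key) := by unfold Pre_filter_normal_by_ND; infer_instance

def pvWitness_filter_normal_by_ND : (List (String × List Int)) × String :=
  ([("pred", [1, 0, 1]), ("a", [5, 6, 7]), ("b", [8])], "pred")

def Spec_filter_normal_by_ND (input_dict : List (String × List Int)) (pred_key : String) (out : List (String × List Int)) : Prop := out = filter_normal_by_ND_alt input_dict pred_key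
instance (input_dict : List (String × List Int)) (pred_key : String) (out : List (String × List Int)) : Decidable (Spec_filter_normal_by_ND input_dict pred_key out) := by unfold Spec_filter_normal_by_ND; infer_instance

-- ===== CLAIM =====
def Claim_equal_filter_normal_by_ND : Prop := ∀ (input_dict : List (String × List Int)) (pred_key : String), Dom_filter_normal_by_ND input_dict pred_key → Pre_filter_normal_by_ND input_dict pred_key → Spec_filter_normal_by_ND input_dict pred_key (filter_normal_by_ND input_dict pred_key)

-- ===== LEMMAS AND PROOFS =====

-- zipWith helpers
theorem zipWith_left_id (xs : List (List Int)) : ∀ (ys : List (List Int)), xs.length = ys.length →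
    List.zipWith (fun a (_ : List Int) => a ++ ([] : List Int)) xs ys = xs := by
  induction xs with
  | nil => intro ys _; simp
  | cons x xs ih =>
    intro ys h
    cases ys with
    | nil => simp at h
    | cons y ys => simpa using ih ys (by simpa using h)

theorem zipWith_ext (f g : List Int → List Int → List Int) (xs : List (List Int)) :
    ∀ (ys : List (List Int)), (∀ y ∈ ys, ∀ a, f a y = g a y) →
    List.zipWith f xs ys = List.zipWith g xs ys := by
  induction xs with
  | nil => intro ys _; simp
  | cons x xs ih =>
    intro ys h
    cases ys with
    | nil => simp
    | cons y ys =>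
      simp only [List.zipWith_cons_cons]
      rw [h y (by simp), ih ys (fun y' hy' => h y' (by simp [hy']))]

theorem zipWith_zipWith_same (f g : List Int → List Int → List Int) (xs : List (List Int)) :
    ∀ (ys : List (List Int)),
    List.zipWith f (List.zipWith g xs ys) ys = List.zipWith (fun a b => f (g a b) b) xs ys := by
  induction xs with
  | nil => intro ys; simp
  | cons x xs ih =>
    intro ys
    cases ys with
    | nil => simp
    | cons y ys => simp [ih ys]

theorem zipWith_map_const_nil (h : List Int → List Int) (ws : List (List Int)) :
    List.zipWith (fun a w => a ++ h w) (ws.map (fun _ => ([] : List Int))) ws = ws.map h := by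
  induction ws with
  | nil => simp
  | cons w ws ih =>
    simp only [List.map_cons, List.zipWith_cons_cons, List.nil_append]
    rw [ih]

-- the first loop collects exactly the qualifying keys and columns, in order
theorem pair_fold (pred_key : String) (preds : List Int) (l : List (String × List Int)) :
    ∀ (x : List String) (y : List (List Int)),
    l.foldl (fun (cc : List String × List (List Int)) kv =>
        if kv.1 ≠ pred_key ∧ kv.2.length = preds.length then (cc.1 ++ [kv.1], cc.2 ++ [kv.2]) else cc)
      (x, y)
    = (x ++ (l.filter (fun kv => decide (kv.1 ≠ pred_key ∧ kv.2.length = preds.length))).map (·.1),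
       y ++ (l.filter (fun kv => decide (kv.1 ≠ pred_key ∧ kv.2.length = preds.length))).map (·.2)) := by
  induction l with
  | nil => intro x y; simp
  | cons kv l ih =>
    intro x y
    by_cases hc : kv.1 ≠ pred_key ∧ kv.2.length = preds.length
    · simp only [List.foldl_cons, if_pos hc, List.filter_cons, decide_eq_true hc]
      rw [ih]
      simp
    · simp only [List.foldl_cons, if_neg hc, List.filter_cons]
      rw [ih]
      simp [hc]

-- the position pass produces, per column, exactly A's zip-filter
theorem enum_fold (ws : List (List Int)) (ps : List Int) : ∀ (s : Nat) (acc0 : List (List Int)) (kept0 : List Int),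
    acc0.length = ws.length →
    (∀ w ∈ ws, w.length = s + ps.length) →
    (PySem.List.enumerate ps (s : Int)).foldl
      (fun (st : List (List Int) × List Int) ip =>
        if ip.2 ≠ 0 then
          (List.zipWith (fun a c => a ++ [PySem.List.pyGetD c ip.1 0]) st.1 ws, st.2 ++ [ip.2])
        else st) (acc0, kept0)
    = (List.zipWith (fun a w => a ++ pvZipFilter (w.drop s) ps) acc0 ws,
       kept0 ++ ps.filter (fun p => p ≠ 0)) := by
  induction ps with
  | nil =>
    intro s acc0 kept0 hlen _
    simp only [PySem.List.enumerate_nil, List.foldl_nil, List.filter_nil, List.append_nil]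
    rw [show (fun a w => a ++ pvZipFilter (List.drop s w) ([] : List Int))
          = (fun a (_ : List Int) => a ++ ([] : List Int)) from by
        funext a w; simp [pvZipFilter]]
    rw [zipWith_left_id acc0 ws hlen]
  | cons p ps ih =>
    intro s acc0 kept0 hlen hws
    have hs : ∀ w ∈ ws, s < w.length := by
      intro w hw; have := hws w hw; simp at this; omega
    rw [PySem.List.enumerate_cons]
    by_cases hp : p ≠ 0
    · simp only [List.foldl_cons, if_pos hp]
      have hcast : (s : Int) + 1 = ((s + 1 : Nat) : Int) := by push_cast; ring
      rw [hcast, ih (s + 1)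
            (List.zipWith (fun a c => a ++ [PySem.List.pyGetD c (s : Int) 0]) acc0 ws)
            (kept0 ++ [p])
            (by rw [List.length_zipWith]; omega)
            (by intro w hw; have := hws w hw; simp only [List.length_cons] at this; omega)]
      rw [zipWith_zipWith_same]
      rw [zipWith_ext _ (fun a w => a ++ pvZipFilter (w.drop s) (p :: ps)) acc0 ws ?_]
      · simp [hp, List.append_assoc]
      · intro w hw a
        have hget : PySem.List.pyGetD w (s : Int) 0 = w[s]'(hs w hw) := by
          rw [PySem.List.pyGetD_natCast]
          exact List.getD_eq_getElem w 0 (hs w hw)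
        show (a ++ [PySem.List.pyGetD w (s : Int) 0]) ++ pvZipFilter (List.drop (s + 1) w) ps
            = a ++ pvZipFilter (List.drop s w) (p :: ps)
        rw [hget, List.drop_eq_getElem_cons (hs w hw)]
        simp [pvZipFilter, hp, List.append_assoc, -List.getElem_cons_drop]
    · simp only [ne_eq, not_not] at hp
      subst hp
      rw [List.foldl_cons, if_neg (fun h => h rfl)]
      have hcast : (s : Int) + 1 = ((s + 1 : Nat) : Int) := by push_cast; ring
      rw [hcast, ih (s + 1) acc0 kept0 hlen
            (by intro w hw; have := hws w hw; simp only [List.length_cons] at this; omega)]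
      rw [zipWith_ext _ (fun a w => a ++ pvZipFilter (w.drop s) ((0 : Int) :: ps)) acc0 ws ?_]
      · simp
      · intro w hw a
        show a ++ pvZipFilter (List.drop (s + 1) w) ps
            = a ++ pvZipFilter (List.drop s w) ((0 : Int) :: ps)
        rw [List.drop_eq_getElem_cons (hs w hw)]
        simp [pvZipFilter, -List.getElem_cons_drop]

-- A's insertion loop equals B's final loop over the pre-filtered (key, filtered-column) pairs
theorem dict_fold (pred_key : String) (preds : List Int) (l : List (String × List Int)) :
    ∀ (fd : PySem.Dict String (List Int)),
    l.foldl (fun fd kv =>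
        if kv.1 ≠ pred_key ∧ kv.2.length = preds.length then
          if pvZipFilter kv.2 preds ≠ [] then fd.insert kv.1 (pvZipFilter kv.2 preds) else fd
        else fd) fd
    = ((l.filter (fun kv => decide (kv.1 ≠ pred_key ∧ kv.2.length = preds.length))).map
         (fun kv => (kv.1, pvZipFilter kv.2 preds))).foldl
        (fun out ka => if ka.2 ≠ [] then out.insert ka.1 ka.2 else out) fd := by
  induction l with
  | nil => intro fd; simp
  | cons kv l ih =>
    intro fd
    by_cases hc : kv.1 ≠ pred_key ∧ kv.2.length = preds.length
    · simp only [List.foldl_cons, if_pos hc, List.filter_cons, decide_eq_true hc, if_true,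
        List.map_cons]
      rw [ih]
    · simp only [List.foldl_cons, if_neg hc, List.filter_cons, decide_eq_false hc,
        Bool.false_eq_true, if_false]
      exact ih fd

-- ===== VERDICT =====
theorem filter_normal_by_ND_spec : Claim_equal_filter_normal_by_ND := by
  intro input_dict pred_key _hdom _hpre
  unfold Spec_filter_normal_by_ND filter_normal_by_ND filter_normal_by_ND_alt
  cases hget : (PySem.Dict.ofList input_dict).get? pred_key with
  | none => rfl
  | some preds =>
    dsimp only
    rw [dict_fold pred_key preds, pair_fold pred_key preds _ [] []]
    dsimp only
    simp only [List.nil_append]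
    have hws : ∀ w ∈ ((PySem.Dict.ofList input_dict).items.filter
        (fun kv => decide (kv.1 ≠ pred_key ∧ kv.2.length = preds.length))).map
          (fun kv => kv.2), w.length = 0 + preds.length := by
      intro w hw
      rcases List.mem_map.mp hw with ⟨kv, hkv, rfl⟩
      have := (List.mem_filter.mp hkv).2
      simp only [decide_eq_true_eq] at this
      omega
    have henum := enum_fold
      (((PySem.Dict.ofList input_dict).items.filter
        (fun kv => decide (kv.1 ≠ pred_key ∧ kv.2.length = preds.length))).map (fun kv => kv.2))
      preds 0
      ((((PySem.Dict.ofList input_dict).items.filter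
        (fun kv => decide (kv.1 ≠ pred_key ∧ kv.2.length = preds.length))).map
          (fun kv => kv.2)).map (fun _ => ([] : List Int))) []
      (by simp) hws
    rw [Nat.cast_zero] at henum
    rw [henum]
    dsimp only
    rw [show (fun (a w : List Int) => a ++ pvZipFilter (List.drop 0 w) preds)
          = (fun (a w : List Int) => a ++ pvZipFilter w preds) from by
        funext a w; rw [List.drop_zero]]
    rw [zipWith_map_const_nil (fun w => pvZipFilter w preds), List.map_map, List.zip_map']
    simp only [List.nil_append, Function.comp]
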